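-- pv_equiv track=rewrite | github.com/4D42/LateX_MFWM | MFWM.py | FWM
-- ===== SOURCE A (Python) =====
-- def DeltaBeta(m,p,n,N,aff_final=False):
-- 	ind = [n+p-m,m,p,n]
-- 	ind.sort()
--
-- 	if ind.count(n+p-m) > 1:
-- 		ind.remove(n+p-m)
--
-- 	if ind.count(m) > 1:
-- 		ind.remove(n+p-m)
--
-- 	if ind.count(p) > 1:
-- 		ind.remove(p)
--
-- 	if ind.count(n) > 1:
-- 		ind.remove(n)
--
-- 	indstr = str(ind)
-- 	indstr = indstr.replace('[','')
-- 	indstr = indstr.replace(']','')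
-- 	indstr = indstr.replace(',','')
-- 	indstr = indstr.replace(' ','')
--
-- 	a = (n-m)*(p-m)
-- 	b = (n-m)*(p-m)*(n+p-N-1)
-- 	c = (n-m)*(p-m)*(3*(n+p-N-1)**2+(n-m)**2+(p-m)**2)
--
-- 	txt = "\Delta \\beta_{"+indstr+"}"
--
-- 	if a<0:
-- 		txt = '-'+txt
-- 		a = -a
-- 		b = -b
-- 		c = -c
--
-- 	if aff_final == True:
-- 		txt += "="+str(a)+"\Delta \omega^2 \\beta_2"
--
-- 		if b != 0:
-- 			txt += "+\\frac{"+str(b)+"}{2}\Delta \omega^3 \\beta_3"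
--
-- 		txt += "+\\frac{"+str(c)+"}{24}\Delta \omega^4 \\beta_4"
-- 		#supretion of txt = '-'+txt
-- 		txt = txt.replace("-\Delta \\beta","\Delta \\beta")
-- 		txt = txt.replace("1\Delta \omega^2","\Delta \omega^2")
-- 		txt = txt.replace("+\\frac{-","-\\frac{")
--
-- 	return txt
--
-- def FWM(n,N):
-- 	text = "+i\gamma & \\left("
-- 	counter = 0 # counter to know how many terms are on a line
--
-- 	for p in range(1,N+1):
-- 		M = list(range(1,N+1))
-- 		if M.count(n) != 0:
-- 			M.remove(n)
--
-- 		if M.count(p)!= 0: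
-- 			M.remove(p)
--
-- 		for m in M:
-- 			npm=n+p-m
-- 			if m<=npm and npm<=N:
-- 				if counter == 3:
-- 					#add the line jump
-- 					text += "\\right.\\\\\\nonumber\n&\\left."
-- 					counter = 0
-- 				#endif
-- 				if npm == m:
-- 					text += "+A^2_"+str(npm)+"A^*_"+str(p)+"e^{i"+DeltaBeta(m,p,n,N)+"z}"
-- 					counter += 1
-- 				else:
-- 					text += "+2A_"+str(npm)+"A_"+str(m)+"A^*_"+str(p)+"e^{i"+DeltaBeta(m,p,n,N)+"z}"
-- 					counter +=1
-- 				#endif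
-- 			#endif
-- 		#endfor
-- 	text += "\\right)"
-- 	text = text.replace("i-","-i")
-- 	text = text.replace("(+","(")
-- 	return text
-- ===== SOURCE B (Python) =====
-- def DeltaBeta(m,p,n,N,aff_final=False):
-- 	ind = [n+p-m,m,p,n]
-- 	ind.sort()
--
-- 	if ind.count(n+p-m) > 1:
-- 		ind.remove(n+p-m)
--
-- 	if ind.count(m) > 1:
-- 		ind.remove(n+p-m)
--
-- 	if ind.count(p) > 1:
-- 		ind.remove(p)
--
-- 	if ind.count(n) > 1:
-- 		ind.remove(n)
--
-- 	indstr = str(ind)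
-- 	indstr = indstr.replace('[','')
-- 	indstr = indstr.replace(']','')
-- 	indstr = indstr.replace(',','')
-- 	indstr = indstr.replace(' ','')
--
-- 	a = (n-m)*(p-m)
-- 	b = (n-m)*(p-m)*(n+p-N-1)
-- 	c = (n-m)*(p-m)*(3*(n+p-N-1)**2+(n-m)**2+(p-m)**2)
--
-- 	txt = "\Delta \\beta_{"+indstr+"}"
--
-- 	if a<0:
-- 		txt = '-'+txt
-- 		a = -a
-- 		b = -b
-- 		c = -c
--
-- 	if aff_final == True:
-- 		txt += "="+str(a)+"\Delta \omega^2 \\beta_2"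
--
-- 		if b != 0:
-- 			txt += "+\\frac{"+str(b)+"}{2}\Delta \omega^3 \\beta_3"
--
-- 		txt += "+\\frac{"+str(c)+"}{24}\Delta \omega^4 \\beta_4"
-- 		#supretion of txt = '-'+txt
-- 		txt = txt.replace("-\Delta \\beta","\Delta \\beta")
-- 		txt = txt.replace("1\Delta \omega^2","\Delta \omega^2")
-- 		txt = txt.replace("+\\frac{-","-\\frac{")
--
-- 	return txt
--
-- def FWM(n,N):
-- 	# B: collect the per-term strings first, then chunk them in threes and join
-- 	# with the line-jump separator; same final replaces as before.
-- 	terms = []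
-- 	for p in range(1,N+1):
-- 		for m in range(1,N+1):
-- 			if m == n or m == p:
-- 				continue
-- 			npm = n+p-m
-- 			if m<=npm and npm<=N:
-- 				if npm == m:
-- 					terms.append("+A^2_"+str(npm)+"A^*_"+str(p)+"e^{i"+DeltaBeta(m,p,n,N)+"z}")
-- 				else:
-- 					terms.append("+2A_"+str(npm)+"A_"+str(m)+"A^*_"+str(p)+"e^{i"+DeltaBeta(m,p,n,N)+"z}")
-- 	chunks = []
-- 	while terms:
-- 		chunks.append(''.join(terms[:3]))
-- 		terms = terms[3:]
-- 	text = "+i\gamma & \\left(" + "\\right.\\\\\\nonumber\n&\\left.".join(chunks) + "\\right)"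
-- 	text = text.replace("i-","-i")
-- 	text = text.replace("(+","(")
-- 	return text
-- ===== Notes on version B (the rewrite author's own statement) =====
-- stated objective: alternative
-- what changed: B first collects the per-term LaTeX strings in a flat list (with the m!=n, m!=p skip folded into the loop instead of list.remove), then chunks that list in threes and joins the chunks with the line-jump separator, replacing A's running counter interleaved with the string build.
import Mathlib
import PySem

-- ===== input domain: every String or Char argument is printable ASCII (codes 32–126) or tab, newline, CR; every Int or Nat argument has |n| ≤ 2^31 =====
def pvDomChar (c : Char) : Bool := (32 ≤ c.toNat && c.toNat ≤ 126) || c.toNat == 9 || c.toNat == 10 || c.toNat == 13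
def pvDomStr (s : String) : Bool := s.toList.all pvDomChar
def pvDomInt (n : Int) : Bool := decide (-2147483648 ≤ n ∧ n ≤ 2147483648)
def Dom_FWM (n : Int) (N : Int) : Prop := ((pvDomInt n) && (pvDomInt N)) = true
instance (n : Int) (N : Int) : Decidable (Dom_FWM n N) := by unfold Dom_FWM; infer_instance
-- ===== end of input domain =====

-- B restructures FWM: it first collects the per-term strings in a list, then chunks them in
-- threes and joins the chunks with the line-jump separator (same final replaces); A interleaves
-- a running counter with the string build. Return values are proved equal; no argument is mutated.

-- ===== PORT A =====
-- shared module helper DeltaBeta (both Pythons call the identical helper).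
-- str(ind) on a list of ints is ported by hand as "[" + ", ".join(map(str, ind)) + "]",
-- which is exactly CPython's repr of a list of ints.
-- list.remove is ported as (remove? …).getD: at every call site here the removed element is
-- still present (the guard count > 1 guarantees it), so the getD arm is dead and the port exact.
def deltaBeta (m p n N : Int) (affFinal : Bool) : String :=
  let ind := PySem.List.sorted [n+p-m, m, p, n] (fun x => x) false
  let ind := if PySem.List.count ind (n+p-m) > 1 then (PySem.List.remove? ind (n+p-m)).getD ind else ind
  let ind := if PySem.List.count ind m > 1 then (PySem.List.remove? ind (n+p-m)).getD ind else ind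
  let ind := if PySem.List.count ind p > 1 then (PySem.List.remove? ind p).getD ind else ind
  let ind := if PySem.List.count ind n > 1 then (PySem.List.remove? ind n).getD ind else ind
  let indstr := "[" ++ PySem.Str.join ", " (ind.map PySem.Int.toStr) ++ "]"
  let indstr := PySem.Str.replace indstr "[" ""
  let indstr := PySem.Str.replace indstr "]" ""
  let indstr := PySem.Str.replace indstr "," ""
  let indstr := PySem.Str.replace indstr " " ""
  let a := (n-m)*(p-m)
  let b := (n-m)*(p-m)*(n+p-N-1)
  let c := (n-m)*(p-m)*(3*(n+p-N-1)^2+(n-m)^2+(p-m)^2)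
  let txt := "\\Delta \\beta_{" ++ indstr ++ "}"
  let s := if a < 0 then ("-" ++ txt, -a, -b, -c) else (txt, a, b, c)
  if affFinal = true then
    let txt := s.1 ++ "=" ++ PySem.Int.toStr s.2.1 ++ "\\Delta \\omega^2 \\beta_2"
    let txt := if s.2.2.1 ≠ 0 then txt ++ "+\\frac{" ++ PySem.Int.toStr s.2.2.1 ++ "}{2}\\Delta \\omega^3 \\beta_3" else txt
    let txt := txt ++ "+\\frac{" ++ PySem.Int.toStr s.2.2.2 ++ "}{24}\\Delta \\omega^4 \\beta_4"
    let txt := PySem.Str.replace txt "-\\Delta \\beta" "\\Delta \\beta"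
    let txt := PySem.Str.replace txt "1\\Delta \\omega^2" "\\Delta \\omega^2"
    PySem.Str.replace txt "+\\frac{-" "-\\frac{"
  else s.1

def FWM (n : Int) (N : Int) : String :=
  let st := (PySem.List.pyRange 1 (N+1) 1).foldl (fun (st : String × Int) p =>
    let M := PySem.List.pyRange 1 (N+1) 1
    let M := if PySem.List.count M n ≠ 0 then (PySem.List.remove? M n).getD M else M
    let M := if PySem.List.count M p ≠ 0 then (PySem.List.remove? M p).getD M else M
    M.foldl (fun (st : String × Int) m =>
      let npm := n + p - m
      if m ≤ npm ∧ npm ≤ N then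
        let st := if st.2 = 3 then (st.1 ++ "\\right.\\\\\\nonumber\n&\\left.", (0:Int)) else st
        if npm = m then
          (st.1 ++ "+A^2_" ++ PySem.Int.toStr npm ++ "A^*_" ++ PySem.Int.toStr p ++ "e^{i" ++ deltaBeta m p n N false ++ "z}", st.2 + 1)
        else
          (st.1 ++ "+2A_" ++ PySem.Int.toStr npm ++ "A_" ++ PySem.Int.toStr m ++ "A^*_" ++ PySem.Int.toStr p ++ "e^{i" ++ deltaBeta m p n N false ++ "z}", st.2 + 1)
      else st) st)
    ("+i\\gamma & \\left(", (0:Int))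
  let text := st.1 ++ "\\right)"
  let text := PySem.Str.replace text "i-" "-i"
  PySem.Str.replace text "(+" "("

-- ===== PORT B =====
-- the `while terms: chunks.append(''.join(terms[:3])); terms = terms[3:]` loop of Source B
def chunksOf3 : List String → List String
  | [] => []
  | t :: ts =>
    PySem.Str.join "" (PySem.List.slice (t :: ts) none (some 3)) ::
      chunksOf3 (PySem.List.slice (t :: ts) (some 3) none)
termination_by ts => ts.length
decreasing_by simp [pysem]

def FWM_alt (n : Int) (N : Int) : String :=
  let terms := (PySem.List.pyRange 1 (N+1) 1).foldl (fun (acc : List String) p =>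
    (PySem.List.pyRange 1 (N+1) 1).foldl (fun (acc : List String) m =>
      if m = n ∨ m = p then acc
      else
        let npm := n + p - m
        if m ≤ npm ∧ npm ≤ N then
          if npm = m then
            acc ++ ["+A^2_" ++ PySem.Int.toStr npm ++ "A^*_" ++ PySem.Int.toStr p ++ "e^{i" ++ deltaBeta m p n N false ++ "z}"]
          else
            acc ++ ["+2A_" ++ PySem.Int.toStr npm ++ "A_" ++ PySem.Int.toStr m ++ "A^*_" ++ PySem.Int.toStr p ++ "e^{i" ++ deltaBeta m p n N false ++ "z}"]
        else acc) acc) []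
  let chunks := chunksOf3 terms
  let text := "+i\\gamma & \\left(" ++ PySem.Str.join "\\right.\\\\\\nonumber\n&\\left." chunks ++ "\\right)"
  let text := PySem.Str.replace text "i-" "-i"
  PySem.Str.replace text "(+" "("

-- ===== PRECONDITION & SPEC =====
def Spec_FWM (n : Int) (N : Int) (out : String) : Prop := out = FWM_alt n N
instance (n : Int) (N : Int) (out : String) : Decidable (Spec_FWM n N out) := by unfold Spec_FWM; infer_instance

-- ===== CLAIM (what is proved, stated in full; the proofs are below) =====
def Claim_equal_FWM : Prop := ∀ (n : Int) (N : Int), Dom_FWM n N → Spec_FWM n N (FWM n N)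

-- ===== LEMMAS AND PROOFS =====

-- the per-term string, the line-jump separator, and the counter step of A's loop
def fwmSep : String := "\\right.\\\\\\nonumber\n&\\left."

def fwmTerm (n N p m : Int) : String :=
  if n + p - m = m then
    "+A^2_" ++ PySem.Int.toStr (n + p - m) ++ "A^*_" ++ PySem.Int.toStr p ++ "e^{i" ++ deltaBeta m p n N false ++ "z}"
  else
    "+2A_" ++ PySem.Int.toStr (n + p - m) ++ "A_" ++ PySem.Int.toStr m ++ "A^*_" ++ PySem.Int.toStr p ++ "e^{i" ++ deltaBeta m p n N false ++ "z}"

def fwmStep (st : String × Int) (s : String) : String × Int :=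
  if st.2 = 3 then (st.1 ++ fwmSep ++ s, 1) else (st.1 ++ s, st.2 + 1)

-- the flat list of term strings both loops generate, per p and overall
def fwmSub (n N p : Int) : List String :=
  ((PySem.List.pyRange 1 (N+1) 1).filter
      (fun m => decide (¬(m = n ∨ m = p) ∧ (m ≤ n + p - m ∧ n + p - m ≤ N)))).map (fwmTerm n N p)

def fwmList (n N : Int) : List String :=
  (PySem.List.pyRange 1 (N+1) 1).flatMap (fwmSub n N)

theorem remove?_of_mem (v : Int) : ∀ (xs : List Int), v ∈ xs → PySem.List.remove? xs v = some (xs.erase v) := by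
  intro xs
  induction xs with
  | nil => simp
  | cons x xs ih =>
    intro h
    by_cases hx : x = v
    · subst hx; simp [PySem.List.remove?, List.idxOf?_cons]
    · have hv : v ∈ xs := by
        rcases (List.mem_cons.mp h) with h1 | h1
        · exact absurd h1.symm hx
        · exact h1
      have hrec := ih hv
      simp only [PySem.List.remove?] at hrec
      obtain ⟨k, hk, hk2⟩ := Option.map_eq_some_iff.mp hrec
      simp only [PySem.List.remove?, List.idxOf?_cons, beq_iff_eq, hx, if_false, hk,
        Option.map_some, List.eraseIdx_cons_succ, hk2]
      rw [List.erase_cons_tail (by simp [hx])]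

theorem removeIf_eq_filter (xs : List Int) (v : Int) (h : xs.Nodup) :
    (if PySem.List.count xs v ≠ 0 then (PySem.List.remove? xs v).getD xs else xs)
      = xs.filter (fun m => m != v) := by
  by_cases hv : v ∈ xs
  · have hc : PySem.List.count xs v ≠ 0 := by
      simpa [PySem.List.count] using (List.count_pos_iff.mpr hv).ne'
    rw [if_pos hc, remove?_of_mem v xs hv, Option.getD_some, List.Nodup.erase_eq_filter h]
  · have hc : PySem.List.count xs v = 0 := by
      simpa [PySem.List.count] using List.count_eq_zero.mpr hv
    rw [if_neg (not_not_intro hc), (List.filter_eq_self).mpr]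
    intro a ha
    simp only [bne_iff_ne, ne_eq]
    exact fun e => hv (e ▸ ha)

theorem nodup_pyRange1 (a b : Int) : (PySem.List.pyRange a b 1).Nodup := by
  rw [PySem.List.pyRange_of_pos a b (by norm_num)]
  refine List.Nodup.map ?_ (List.nodup_range)
  intro x y hxy
  dsimp at hxy
  omega

-- A's inner loop over its M equals the counter fold over the per-p term list
theorem innerA_eq (n N p : Int) (st : String × Int) :
    (let M := PySem.List.pyRange 1 (N+1) 1
     let M := if PySem.List.count M n ≠ 0 then (PySem.List.remove? M n).getD M else M
     let M := if PySem.List.count M p ≠ 0 then (PySem.List.remove? M p).getD M else M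
     M.foldl (fun (st : String × Int) m =>
      let npm := n + p - m
      if m ≤ npm ∧ npm ≤ N then
        let st := if st.2 = 3 then (st.1 ++ "\\right.\\\\\\nonumber\n&\\left.", (0:Int)) else st
        if npm = m then
          (st.1 ++ "+A^2_" ++ PySem.Int.toStr npm ++ "A^*_" ++ PySem.Int.toStr p ++ "e^{i" ++ deltaBeta m p n N false ++ "z}", st.2 + 1)
        else
          (st.1 ++ "+2A_" ++ PySem.Int.toStr npm ++ "A_" ++ PySem.Int.toStr m ++ "A^*_" ++ PySem.Int.toStr p ++ "e^{i" ++ deltaBeta m p n N false ++ "z}", st.2 + 1)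
      else st) st)
    = (fwmSub n N p).foldl fwmStep st := by
  simp only
  rw [removeIf_eq_filter _ n (nodup_pyRange1 _ _),
      removeIf_eq_filter _ p ((nodup_pyRange1 1 (N+1)).filter _),
      List.filter_filter]
  rw [PySem.List.foldl_congr_mem _ _
    (fun (st : String × Int) m => if (m ≤ n + p - m ∧ n + p - m ≤ N) then fwmStep st (fwmTerm n N p m) else st) _ ?_]
  · rw [PySem.List.foldl_ite_eq_foldl_filter (fun m => (m ≤ n + p - m ∧ n + p - m ≤ N))
        (fun st m => fwmStep st (fwmTerm n N p m)), List.filter_filter]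
    rw [fwmSub, List.foldl_map]
    congr 1
    apply List.filter_congr
    intro m _
    by_cases h1 : m = n <;> by_cases h2 : m = p <;>
      by_cases h3 : (m ≤ n + p - m ∧ n + p - m ≤ N) <;> simp [h1, h2, h3]
  · intro st m _
    simp only [fwmStep, fwmTerm, fwmSep]
    split_ifs <;> simp_all [← String.append_assoc]

-- B's inner loop appends exactly the per-p term list
theorem innerB_eq (n N p : Int) (acc : List String) :
    (PySem.List.pyRange 1 (N+1) 1).foldl (fun (acc : List String) m =>
      if m = n ∨ m = p then acc
      else
        let npm := n + p - m
        if m ≤ npm ∧ npm ≤ N then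
          if npm = m then
            acc ++ ["+A^2_" ++ PySem.Int.toStr npm ++ "A^*_" ++ PySem.Int.toStr p ++ "e^{i" ++ deltaBeta m p n N false ++ "z}"]
          else
            acc ++ ["+2A_" ++ PySem.Int.toStr npm ++ "A_" ++ PySem.Int.toStr m ++ "A^*_" ++ PySem.Int.toStr p ++ "e^{i" ++ deltaBeta m p n N false ++ "z}"]
        else acc) acc
    = acc ++ fwmSub n N p := by
  rw [PySem.List.foldl_congr_mem _ _
    (fun (acc : List String) m =>
      if (¬(m = n ∨ m = p) ∧ (m ≤ n + p - m ∧ n + p - m ≤ N)) then acc ++ [fwmTerm n N p m] else acc) _ ?_]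
  · exact PySem.List.foldl_append_ite _ (fwmTerm n N p) _ acc
  · intro acc m _
    simp only [fwmTerm]
    split_ifs <;> simp_all

theorem FWM_eq (n N : Int) :
    FWM n N =
      PySem.Str.replace (PySem.Str.replace
        (((fwmList n N).foldl fwmStep ("+i\\gamma & \\left(", (0:Int))).1 ++ "\\right)")
        "i-" "-i") "(+" "(" := by
  simp only [FWM]
  rw [PySem.List.foldl_congr_mem _ _ (fun st p => (fwmSub n N p).foldl fwmStep st) _
      (fun st p _ => innerA_eq n N p st)]
  rw [fwmList, List.foldl_flatMap]

theorem FWM_alt_eq (n N : Int) :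
    FWM_alt n N =
      PySem.Str.replace (PySem.Str.replace
        ("+i\\gamma & \\left(" ++ PySem.Str.join fwmSep (chunksOf3 (fwmList n N)) ++ "\\right)")
        "i-" "-i") "(+" "(" := by
  simp only [FWM_alt, fwmSep]
  rw [PySem.List.foldl_congr_mem _ _ (fun acc p => acc ++ fwmSub n N p) _
      (fun acc p _ => innerB_eq n N p acc)]
  rw [PySem.List.foldl_append_eq_flatMap, List.nil_append, fwmList]

theorem join_cons_ne (sep x : String) (ys : List String) (h : ys ≠ []) :
    PySem.Str.join sep (x :: ys) = x ++ (sep ++ PySem.Str.join sep ys) := by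
  cases ys with
  | nil => exact absurd rfl h
  | cons y ys =>
    rw [← String.toList_inj]
    simp [PySem.Str.toList_join, PySem.Chars.join, List.intercalate]

theorem join_singleton (sep x : String) : PySem.Str.join sep [x] = x := by
  rw [← String.toList_inj]
  simp [PySem.Str.toList_join, PySem.Chars.join, List.intercalate]

theorem chunksOf3_ne_nil (t : String) (ts : List String) : chunksOf3 (t :: ts) ≠ [] := by
  rw [chunksOf3]
  exact List.cons_ne_nil _ _

theorem slice_take3 (ts : List String) : PySem.List.slice ts none (some 3) = ts.take 3 := by
  simp [pysem]

theorem slice_drop3 (ts : List String) : PySem.List.slice ts (some 3) none = ts.drop 3 := by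
  simp [pysem]

theorem chunksOf3_cons (t : String) (ts : List String) :
    chunksOf3 (t :: ts) = PySem.Str.join "" ((t :: ts).take 3) :: chunksOf3 ((t :: ts).drop 3) := by
  rw [chunksOf3, slice_take3, slice_drop3]

theorem chunksOf3_nil : chunksOf3 [] = [] := by
  rw [chunksOf3]

theorem join_empty_two (a b : String) : PySem.Str.join "" [a, b] = a ++ b := by
  rw [← String.toList_inj]
  simp [PySem.Str.toList_join, PySem.Chars.join, List.intercalate]

theorem join_empty_three (a b c : String) : PySem.Str.join "" [a, b, c] = a ++ (b ++ c) := by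
  rw [← String.toList_inj]
  simp [PySem.Str.toList_join, PySem.Chars.join, List.intercalate]

theorem join_nil (sep : String) : PySem.Str.join sep [] = "" := rfl

theorem run_chunks_aux :
    ∀ (k : Nat) (ts : List String), ts.length ≤ k → ∀ (t : String),
      (ts.foldl fwmStep (t, 0)).1 = t ++ PySem.Str.join fwmSep (chunksOf3 ts) := by
  intro k
  induction k with
  | zero =>
    intro ts h t
    have : ts = [] := List.length_eq_zero_iff.mp (Nat.le_zero.mp h)
    subst this
    simp [chunksOf3_nil, join_nil]
  | succ k ih =>
    intro ts h t
    match ts with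
    | [] => simp [chunksOf3_nil, join_nil]
    | [a] =>
      simp [List.foldl_cons, List.foldl_nil, fwmStep, chunksOf3_cons, chunksOf3_nil,
        join_singleton]
    | [a, b] =>
      simp [List.foldl_cons, List.foldl_nil, fwmStep, chunksOf3_cons, chunksOf3_nil,
        join_singleton, join_empty_two, String.append_assoc]
    | [a, b, c] =>
      simp [List.foldl_cons, List.foldl_nil, fwmStep, chunksOf3_cons, chunksOf3_nil,
        join_singleton, join_empty_three, String.append_assoc]
    | a :: b :: c :: d :: rest =>
      have h3 : (d :: rest).length ≤ k := by simp at h ⊢; omega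
      have lhs : ((a :: b :: c :: d :: rest).foldl fwmStep (t, 0)).1
          = ((d :: rest).foldl fwmStep ((((t ++ a) ++ b) ++ c) ++ fwmSep, 0)).1 := by
        simp only [List.foldl_cons]
        norm_num [fwmStep]
      rw [lhs, ih _ h3]
      rw [chunksOf3_cons a (b :: c :: d :: rest)]
      simp only [List.take_succ_cons, List.take_zero, List.drop_succ_cons, List.drop_zero]
      rw [join_cons_ne _ _ _ (chunksOf3_ne_nil d rest), join_empty_three]
      simp [String.append_assoc]

theorem run_chunks (ts : List String) (t : String) :
    (ts.foldl fwmStep (t, 0)).1 = t ++ PySem.Str.join fwmSep (chunksOf3 ts) :=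
  run_chunks_aux ts.length ts le_rfl t

-- ===== VERDICT (by name: the statement is the Claim_ definition above) =====
theorem FWM_spec : Claim_equal_FWM := by
  intro n N _
  show FWM n N = FWM_alt n N
  rw [FWM_eq, FWM_alt_eq, run_chunks]
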